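-- pv_equiv track=rewrite | github.com/wtsnjp/nlp100 | chap04/k36.py | frequency_ranking
-- ===== SOURCE A (Python) =====
-- import collections
--
-- def frequency_ranking(data):
--     ls, tmp = [], []
--     for s in data:
--         for m in s:
--             tmp.append(m['base'])
--     cd = collections.Counter(tmp)
--     for k, v in cd.most_common():
--         ls.append([k, v])
--     return ls
-- ===== SOURCE B (Python) =====
-- def frequency_ranking(data):
--     # Counting/bucket sort: count bases in first-seen order, bucket words by
--     # count, then read buckets from highest count down (stable for ties).
--     counts = {}
--     for s in data:
--         for m in s:
--             w = m['base']
--             counts[w] = counts.get(w, 0) + 1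
--     maxc = max(counts.values(), default=0)
--     buckets = [[] for _ in range(maxc + 1)]
--     for w, c in counts.items():
--         buckets[c].append(w)
--     result = []
--     for c in range(maxc, 0, -1):
--         for w in buckets[c]:
--             result.append([w, c])
--     return result
-- ===== Notes on version B (the rewrite author's own statement) =====
-- stated objective: alternative
-- what changed: Replaces Counter(...).most_common() (a stable comparison sort of the count-dict items) by a counting/bucket sort: the count dict is built directly in one pass, words are bucketed by their count, and buckets are emitted from the highest count down, reproducing the descending, insertion-order-stable ranking.
import Mathlib
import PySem

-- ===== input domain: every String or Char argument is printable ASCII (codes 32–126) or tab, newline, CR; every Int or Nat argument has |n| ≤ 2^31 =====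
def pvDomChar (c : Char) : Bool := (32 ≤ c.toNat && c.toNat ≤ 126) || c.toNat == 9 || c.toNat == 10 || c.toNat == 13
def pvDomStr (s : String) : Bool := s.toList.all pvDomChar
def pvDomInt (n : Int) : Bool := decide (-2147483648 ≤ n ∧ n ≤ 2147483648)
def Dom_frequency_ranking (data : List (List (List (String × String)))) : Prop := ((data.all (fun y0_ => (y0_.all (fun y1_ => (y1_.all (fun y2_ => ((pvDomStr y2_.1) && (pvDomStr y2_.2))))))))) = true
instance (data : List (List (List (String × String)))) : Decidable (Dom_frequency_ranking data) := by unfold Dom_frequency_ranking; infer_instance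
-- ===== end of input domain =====

-- B replaces A's Counter.most_common() sort by a counting/bucket sort over the count dict (objective: alternative).

-- ===== PORT A =====
-- m['base']: dict lookup, first match; the "" default is unreachable under Pre_ (which demands the key).
def pvBase (m : List (String × String)) : String := (PySem.Dict.mk m).getD "base" ""

def frequency_ranking (data : List (List (List (String × String)))) : List (String × Int) :=
  let tmp := data.foldl (fun tmp s => s.foldl (fun tmp m => tmp ++ [pvBase m]) tmp) []
  let cd := PySem.Dict.counter tmp
  -- cd.most_common() = sorted(cd.items(), key=itemgetter(1), reverse=True) (CPython's definition)
  (PySem.List.sorted cd.items (fun p => p.2) true).foldl (fun ls p => ls ++ [(p.1, p.2)]) []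

-- ===== PORT B =====
def frequency_ranking_alt (data : List (List (List (String × String)))) : List (String × Int) :=
  let counts := data.foldl (fun d s => s.foldl (fun d m =>
      let w := pvBase m; d.insert w (d.getD w 0 + 1)) d) PySem.Dict.empty
  let maxc := PySem.List.maxD counts.values (fun v => v) 0
  -- buckets[c].append(w); every count c satisfies 1 ≤ c ≤ maxc, so .toNat indexing is exact
  let buckets := counts.items.foldl
      (fun bk p => bk.set p.2.toNat (bk.getD p.2.toNat [] ++ [p.1]))
      (List.replicate (maxc.toNat + 1) ([] : List String))
  (PySem.List.pyRange maxc 0 (-1)).foldl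
      (fun res c => (buckets.getD c.toNat []).foldl (fun res w => res ++ [(w, c)]) res) []

-- ===== PRECONDITION & SPEC =====
-- Pre_ excludes exactly the inputs where some morph dict lacks the key 'base', on which A (and B) raise KeyError.
def Pre_frequency_ranking (data : List (List (List (String × String)))) : Prop :=
  ∀ s ∈ data, ∀ m ∈ s, (PySem.Dict.mk m).contains "base" = true
instance (data : List (List (List (String × String)))) : Decidable (Pre_frequency_ranking data) := by unfold Pre_frequency_ranking; infer_instance

def pvWitness_frequency_ranking : (List (List (List (String × String)))) :=
  [[[("base", "cat")], [("base", "dog"), ("pos", "n")]], [[("base", "cat")]]]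

def Spec_frequency_ranking (data : List (List (List (String × String)))) (out : List (String × Int)) : Prop := out = frequency_ranking_alt data
instance (data : List (List (List (String × String)))) (out : List (String × Int)) : Decidable (Spec_frequency_ranking data out) := by unfold Spec_frequency_ranking; infer_instance

-- ===== CLAIM (what is proved, stated in full; the proofs are below) =====
def Claim_equal_frequency_ranking : Prop := ∀ (data : List (List (List (String × String)))), Dom_frequency_ranking data → Pre_frequency_ranking data → Spec_frequency_ranking data (frequency_ranking data)

-- ===== LEMMAS AND PROOFS =====

-- The strict order both outputs are listed in: count descending, ties by position in the count dict.
def pvR (items : List (String × Int)) (a b : String × Int) : Prop :=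
  b.2 < a.2 ∨ (a.2 = b.2 ∧ items.idxOf a < items.idxOf b)

def pvToks (data : List (List (List (String × String)))) : List String :=
  data.flatMap (fun s => s.map pvBase)

def pvMaxc (data : List (List (List (String × String)))) : Int :=
  PySem.List.maxD (PySem.Dict.counter (pvToks data)).values (fun v => v) 0

theorem pv_insertBy_perm {α : Type} (before : α → α → Bool) (x : α) (ys : List α) :
    (PySem.List.insertBy before x ys).Perm (x :: ys) := by
  induction ys with
  | nil => simp [PySem.List.insertBy]
  | cons y ys ih =>
    simp only [PySem.List.insertBy]
    split
    · exact List.Perm.refl _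
    · exact (ih.cons y).trans (List.Perm.swap x y ys)

theorem pv_insertBy_pairwise {α : Type} {r : α → α → Prop} (before : α → α → Bool) (x : α)
    (ys : List α) (hys : ys.Pairwise r)
    (h1 : ∀ y ∈ ys, before x y = true → r x y)
    (h2 : ∀ y ∈ ys, before x y = false → r y x)
    (hprop : ∀ y z, y ∈ ys → z ∈ ys → before x y = true → r y z → before x z = true) :
    (PySem.List.insertBy before x ys).Pairwise r := by
  induction ys with
  | nil => simp [PySem.List.insertBy]
  | cons y ys ih =>
    rw [List.pairwise_cons] at hys
    simp only [PySem.List.insertBy]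
    split
    · rename_i hb
      refine List.pairwise_cons.2 ⟨?_, List.pairwise_cons.2 ⟨hys.1, hys.2⟩⟩
      intro z hz
      rcases List.mem_cons.1 hz with rfl | hz'
      · exact h1 z (by simp) (by simpa using hb)
      · exact h1 z (by simp [hz']) (hprop y z (by simp) (by simp [hz']) hb (hys.1 z hz'))
    · rename_i hb
      refine List.pairwise_cons.2 ⟨?_, ?_⟩
      · intro z hz
        rw [PySem.List.mem_insertBy] at hz
        rcases hz with rfl | hz
        · exact h2 y (by simp) (by simpa using hb)
        · exact hys.1 z hz
      · exact ih hys.2 (fun z hz hb' => h1 z (by simp [hz]) hb')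
          (fun z hz hb' => h2 z (by simp [hz]) hb')
          (fun z w hz hw hb' hr => hprop z w (by simp [hz]) (by simp [hw]) hb' hr)

-- A's sorted(items, key=snd, reverse=True) is stable: it is pairwise-sorted by pvR.
theorem pv_sorted_rev_stable (xs : List (String × Int)) (hnd : xs.Nodup) :
    (PySem.List.sorted xs (fun p => p.2) true).Pairwise (pvR xs) := by
  rw [PySem.List.sorted_rev_eq_foldl_insertBy]
  suffices aux : ∀ (rem pre acc : List (String × Int)), pre ++ rem = xs → acc.Perm pre →
      acc.Pairwise (pvR xs) →
      (rem.foldl (fun acc x =>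
        PySem.List.insertBy (fun a b => decide ((fun p : String × Int => p.2) b < (fun p : String × Int => p.2) a)) x acc) acc).Pairwise (pvR xs) by
    exact aux xs [] [] rfl (List.Perm.refl _) (by simp)
  intro rem
  induction rem with
  | nil => intro pre acc _ _ hp; simpa using hp
  | cons x rem ih =>
    intro pre acc heq hperm hp
    have hxnotpre : x ∉ pre := by
      rw [← heq] at hnd
      have := (List.nodup_append.1 hnd).2.2
      intro hx
      exact this x hx x (by simp) rfl
    simp only [List.foldl_cons]
    apply ih (pre ++ [x])
    · simpa using heq
    · exact (pv_insertBy_perm _ x acc).trans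
        ((hperm.cons x).trans (List.perm_append_singleton x pre).symm)
    · apply pv_insertBy_pairwise _ x acc hp
      · intro y _ hb
        exact Or.inl (by simpa using hb)
      · intro y hy hb
        have hyx : x.2 ≤ y.2 := by simpa using hb
        rcases lt_or_eq_of_le hyx with hlt | heq2
        · exact Or.inl hlt
        · refine Or.inr ⟨heq2.symm, ?_⟩
          have hypre : y ∈ pre := hperm.mem_iff.1 hy
          rw [← heq, List.idxOf_append, List.idxOf_append, if_pos hypre, if_neg hxnotpre,
            List.idxOf_cons_self]
          have := List.idxOf_lt_length_of_mem hypre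
          omega
      · intro y z _ _ hb hr
        have h1 : y.2 < x.2 := by simpa using hb
        have h2 : z.2 ≤ y.2 := by
          rcases hr with h | h
          · exact le_of_lt h
          · exact le_of_eq h.1.symm
        simp only [decide_eq_true_eq]
        omega

theorem pv_nodup_pairwise_idxOf {α : Type} [BEq α] [LawfulBEq α] (l : List α) (h : l.Nodup) :
    l.Pairwise (fun a b => l.idxOf a < l.idxOf b) := by
  rw [List.pairwise_iff_getElem]
  intro i j hi hj hij
  rw [h.idxOf_getElem, h.idxOf_getElem]
  exact hij

theorem pv_buckets_spec (l : List (String × Int)) :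
    ∀ (bk : List (List String)) (c : Nat), (∀ p ∈ l, p.2.toNat < bk.length) →
    (l.foldl (fun bk p => bk.set p.2.toNat (bk.getD p.2.toNat [] ++ [p.1])) bk).getD c []
      = bk.getD c [] ++ (l.filter (fun p => p.2.toNat == c)).map (·.1) := by
  induction l with
  | nil => intro bk c _; simp
  | cons p l ih =>
    intro bk c hlen
    simp only [List.foldl_cons]
    rw [ih _ c (fun q hq => by rw [List.length_set]; exact hlen q (by simp [hq]))]
    by_cases hc : p.2.toNat = c
    · subst hc
      rw [List.filter_cons_of_pos (by simp), List.getD_eq_getElem?_getD,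
        List.getElem?_set_self (hlen p (by simp))]
      simp [List.getD_eq_getElem?_getD]
    · rw [List.filter_cons_of_neg (by simp [hc]), List.getD_eq_getElem?_getD,
        List.getElem?_set_ne hc]
      simp [List.getD_eq_getElem?_getD]

theorem pv_perm_flatMap_filter (cs : List Int) :
    ∀ (l : List (String × Int)), cs.Nodup → (∀ a ∈ l, a.2 ∈ cs) →
    (cs.flatMap (fun c => l.filter (fun p => p.2 == c))).Perm l := by
  induction cs with
  | nil => intro l _ hcov; cases l with
    | nil => simp
    | cons a l => exact absurd (hcov a (by simp)) (by simp)
  | cons c cs ih =>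
    intro l hnd hcov
    rw [List.flatMap_cons]
    have hrw : ∀ c' ∈ cs, l.filter (fun p => p.2 == c')
        = (l.filter (fun p => !(p.2 == c))).filter (fun p => p.2 == c') := by
      intro c' hc'
      rw [List.filter_filter]
      apply List.filter_congr
      intro p _
      by_cases h : p.2 = c'
      · have : c ≠ c' := fun hcc => (List.nodup_cons.1 hnd).1 (hcc ▸ hc')
        simp [h, this.symm]
      · simp [h]
    have hmap : cs.flatMap (fun c' => l.filter (fun p => p.2 == c'))
        = cs.flatMap (fun c' => (l.filter (fun p => !(p.2 == c))).filter (fun p => p.2 == c')) := by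
      simp only [List.flatMap]
      congr 1
      exact List.map_congr_left hrw
    rw [hmap]
    have hperm := ih (l.filter (fun p => !(p.2 == c))) (List.nodup_cons.1 hnd).2 (by
      intro a ha
      have h1 := hcov a (List.mem_of_mem_filter ha)
      have h2 : ¬(a.2 = c) := by simpa using List.of_mem_filter ha
      rcases List.mem_cons.1 h1 with h | h
      · exact absurd h h2
      · exact h)
    exact (List.Perm.append_left _ hperm).trans (List.filter_append_perm _ l)

theorem pv_pairwise_flatMap_filter (items : List (String × Int)) (hnd : items.Nodup)
    (cs : List Int) (hcs : cs.Pairwise (fun a b => b < a)) :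
    (cs.flatMap (fun c => items.filter (fun p => p.2 == c))).Pairwise (pvR items) := by
  induction cs with
  | nil => simp
  | cons c cs ih =>
    rw [List.pairwise_cons] at hcs
    rw [List.flatMap_cons, List.pairwise_append]
    refine ⟨?_, ih hcs.2, ?_⟩
    · have hpw : (items.filter (fun p => p.2 == c)).Pairwise
          (fun a b => items.idxOf a < items.idxOf b) :=
        (pv_nodup_pairwise_idxOf items hnd).sublist List.filter_sublist
      refine hpw.imp_of_mem ?_
      intro a b ha hb hab
      have ha2 : a.2 = c := by simpa using List.of_mem_filter ha
      have hb2 : b.2 = c := by simpa using List.of_mem_filter hb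
      exact Or.inr ⟨ha2.trans hb2.symm, hab⟩
    · intro a ha b hb
      have ha2 : a.2 = c := by simpa using List.of_mem_filter ha
      rcases List.mem_flatMap.1 hb with ⟨c', hc', hbf⟩
      have hb2 : b.2 = c' := by simpa using List.of_mem_filter hbf
      exact Or.inl (by rw [ha2, hb2]; exact hcs.1 c' hc')

theorem pv_max?_ne_none {α κ : Type} [LT κ] [DecidableLT κ] (xs : List α) (key : α → κ)
    (h : xs ≠ []) : PySem.List.max? xs key ≠ none := by
  have aux : ∀ (l : List α) (m : α),
      l.foldl (fun acc x => match acc with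
        | none => some x
        | some m => if key m < key x then some x else some m) (some m) ≠ none := by
    intro l
    induction l with
    | nil => simp
    | cons y l ih => intro m; simp only [List.foldl_cons]; split <;> apply ih
  cases xs with
  | nil => exact absurd rfl h
  | cons y ys => simpa [PySem.List.max?] using aux ys y

theorem pv_cover (data : List (List (List (String × String)))) :
    ∀ p ∈ (PySem.Dict.counter (pvToks data)).items, 0 < p.2 ∧ p.2 ≤ pvMaxc data := by
  intro p hp
  constructor
  · rw [PySem.Dict.items_counter] at hp
    rcases List.mem_map.1 hp with ⟨k, hk, rfl⟩
    have : k ∈ pvToks data := (PySem.Set.mem_ofList _ _).1 hk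
    simpa using List.count_pos_iff.2 this
  · have hmem : p.2 ∈ (PySem.Dict.counter (pvToks data)).values :=
      List.mem_map.2 ⟨p, hp, rfl⟩
    have hne : (PySem.Dict.counter (pvToks data)).values ≠ [] := List.ne_nil_of_mem hmem
    unfold pvMaxc PySem.List.maxD
    cases h : PySem.List.max? (PySem.Dict.counter (pvToks data)).values (fun v => v) with
    | none => exact absurd h (pv_max?_ne_none _ _ hne)
    | some m => simpa using PySem.List.max?_isMax h p.2 hmem

theorem pv_flatMap_congr {α β : Type} (cs : List α) (f g : α → List β)
    (h : ∀ c ∈ cs, f c = g c) : cs.flatMap f = cs.flatMap g := by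
  induction cs with
  | nil => rfl
  | cons c cs ih =>
    rw [List.flatMap_cons, List.flatMap_cons, h c (by simp), ih (fun c hc => h c (by simp [hc]))]

theorem pv_A_eq (data : List (List (List (String × String)))) :
    frequency_ranking data
      = PySem.List.sorted (PySem.Dict.counter (pvToks data)).items (fun p => p.2) true := by
  unfold frequency_ranking pvToks
  have h2 : (List.flatMap (fun x => [pvBase x]))
      = (fun s : List (List (String × String)) => List.map pvBase s) := by
    funext s
    induction s with
    | nil => rfl
    | cons m s ih => simp only [List.flatMap_cons, List.map_cons, List.singleton_append] at *; rw [ih]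
  simp only [PySem.List.foldl_append_eq_flatMap,
    PySem.List.foldl_append_singleton_eq_map (fun p : String × Int => (p.1, p.2)),
    List.nil_append, Prod.mk.eta, List.map_id', h2]

theorem pv_counts_eq (data : List (List (List (String × String)))) :
    data.foldl (fun d s => s.foldl (fun d m =>
        let w := pvBase m; d.insert w (d.getD w 0 + 1)) d) PySem.Dict.empty
      = PySem.Dict.counter (pvToks data) := by
  rw [← PySem.Dict.foldl_insert_getD_add_one_eq_counter, pvToks, List.foldl_flatMap]
  apply PySem.List.foldl_congr_mem
  intro d s _
  rw [List.foldl_map]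

theorem pv_B_eq (data : List (List (List (String × String)))) :
    frequency_ranking_alt data
      = (PySem.List.pyRange (pvMaxc data) 0 (-1)).flatMap
          (fun c => (PySem.Dict.counter (pvToks data)).items.filter (fun p => p.2 == c)) := by
  have hz : frequency_ranking_alt data =
      (PySem.List.pyRange (pvMaxc data) 0 (-1)).foldl
        (fun res c => (((PySem.Dict.counter (pvToks data)).items.foldl
            (fun bk p => bk.set p.2.toNat (bk.getD p.2.toNat [] ++ [p.1]))
            (List.replicate ((pvMaxc data).toNat + 1) ([] : List String))).getD c.toNat []).foldl
          (fun res w => res ++ [(w, c)]) res) [] := by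
    unfold frequency_ranking_alt pvMaxc
    rw [pv_counts_eq]
  rw [hz]
  have hcov := pv_cover data
  have hbk : ∀ c : Nat,
      ((PySem.Dict.counter (pvToks data)).items.foldl
          (fun bk p => bk.set p.2.toNat (bk.getD p.2.toNat [] ++ [p.1]))
          (List.replicate ((pvMaxc data).toNat + 1) ([] : List String))).getD c []
      = ((PySem.Dict.counter (pvToks data)).items.filter (fun p => p.2.toNat == c)).map (·.1) := by
    intro c
    rw [pv_buckets_spec _ _ c (by
      intro p hp
      have := hcov p hp
      rw [List.length_replicate]
      omega)]
    simp [List.getD_eq_getElem?_getD, List.getElem?_replicate]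
    split <;> simp
  refine Eq.trans (PySem.List.foldl_congr_mem _ _
      (fun res c => res ++ (((PySem.Dict.counter (pvToks data)).items.foldl
          (fun bk p => bk.set p.2.toNat (bk.getD p.2.toNat [] ++ [p.1]))
          (List.replicate ((pvMaxc data).toNat + 1) ([] : List String))).getD c.toNat []).map
        (fun w => (w, c))) []
      (fun res c _ => PySem.List.foldl_append_singleton_eq_map _ _ res)) ?_
  rw [PySem.List.foldl_append_eq_flatMap, List.nil_append]
  apply pv_flatMap_congr
  intro c hc
  rcases PySem.List.mem_pyRange_neg_one.1 hc with ⟨hc0, _⟩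
  rw [hbk c.toNat, List.map_map]
  have hfil : (PySem.Dict.counter (pvToks data)).items.filter (fun p => p.2.toNat == c.toNat)
      = (PySem.Dict.counter (pvToks data)).items.filter (fun p => p.2 == c) := by
    apply List.filter_congr
    intro p hp
    have := (hcov p hp).1
    by_cases h : p.2 = c
    · simp [h]
    · have hne : p.2.toNat ≠ c.toNat := by omega
      simp [h, hne]
  rw [hfil]
  have hid : ((PySem.Dict.counter (pvToks data)).items.filter (fun p => p.2 == c)).map
        ((fun w => (w, c)) ∘ (·.1))
      = ((PySem.Dict.counter (pvToks data)).items.filter (fun p => p.2 == c)).map id := by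
    apply List.map_congr_left
    intro p hp
    have : p.2 = c := by simpa using List.of_mem_filter hp
    simp [← this]
  rw [hid, List.map_id]

-- ===== VERDICT (by name: the statement is the Claim_ definition above) =====
theorem frequency_ranking_spec : Claim_equal_frequency_ranking := by
  intro data _ _
  unfold Spec_frequency_ranking
  rw [pv_A_eq, pv_B_eq]
  have hnd : (PySem.Dict.counter (pvToks data)).items.Nodup :=
    (PySem.Dict.nodup_keys_counter (pvToks data)).of_map _
  have hcov := pv_cover data
  have hgt : (PySem.List.pyRange (pvMaxc data) 0 (-1)).Pairwise (fun a b => b < a) := by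
    rw [PySem.List.pyRange_neg_one_eq_reverse]
    exact List.pairwise_reverse.2 (by simpa using PySem.List.pairwise_lt_pyRange_one (0 + 1) (pvMaxc data + 1))
  have hndcs : (PySem.List.pyRange (pvMaxc data) 0 (-1)).Nodup :=
    hgt.imp (fun h => h.ne')
  refine List.Perm.eq_of_pairwise ?_
    (pv_sorted_rev_stable _ hnd)
    (pv_pairwise_flatMap_filter _ hnd _ hgt)
    ((PySem.List.sorted_perm _ _ _).trans
      (pv_perm_flatMap_filter _ _ hndcs (fun a ha =>
        PySem.List.mem_pyRange_neg_one.2 ⟨(hcov a ha).1, (hcov a ha).2⟩)).symm)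
  intro a b _ _ h1 h2
  exfalso
  rcases h1 with h1 | ⟨he1, hi1⟩ <;> rcases h2 with h2 | ⟨he2, hi2⟩ <;> omega
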